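-- pv_equiv track=rewrite | github.com/baltth/cdb-check | cdb_check.py | resolve_preset_refs
-- ===== SOURCE A (Python) =====
-- from typing import List, Dict, Set, Union, Tuple, Callable, Optional, Any
--
-- PRESET_REF_PREFIX = '$'
--
-- def resolve_preset_refs(presets: Dict[str, List[str]], flags: List[str]) -> List[str]:
--     if not flags:
--         return []
--
--     if flags[0].startswith(PRESET_REF_PREFIX):
--         preset_name = flags[0].removeprefix(PRESET_REF_PREFIX)
--         front = resolve_preset_refs(presets, presets[preset_name])
--     else:
--         front = [flags[0]]
--
--     return front + resolve_preset_refs(presets, flags[1:])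
-- ===== SOURCE B (Python) =====
-- PRESET_REF_PREFIX = '$'
--
-- def resolve_preset_refs(presets, flags):
--     result = []
--     stack = list(reversed(flags))
--     while stack:
--         item = stack.pop()
--         if item.startswith(PRESET_REF_PREFIX):
--             name = item.removeprefix(PRESET_REF_PREFIX)
--             stack.extend(reversed(presets[name]))
--         else:
--             result.append(item)
--     return result
-- ===== Notes on version B (the rewrite author's own statement) =====
-- stated objective: faster
-- what changed: Replaced A's recursion (which recurses both into referenced presets and on the tail, rebuilding the answer with repeated front+rest list concatenation) by a single iterative depth-first loop over an explicit work stack with an append-only accumulator.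
import Mathlib
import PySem

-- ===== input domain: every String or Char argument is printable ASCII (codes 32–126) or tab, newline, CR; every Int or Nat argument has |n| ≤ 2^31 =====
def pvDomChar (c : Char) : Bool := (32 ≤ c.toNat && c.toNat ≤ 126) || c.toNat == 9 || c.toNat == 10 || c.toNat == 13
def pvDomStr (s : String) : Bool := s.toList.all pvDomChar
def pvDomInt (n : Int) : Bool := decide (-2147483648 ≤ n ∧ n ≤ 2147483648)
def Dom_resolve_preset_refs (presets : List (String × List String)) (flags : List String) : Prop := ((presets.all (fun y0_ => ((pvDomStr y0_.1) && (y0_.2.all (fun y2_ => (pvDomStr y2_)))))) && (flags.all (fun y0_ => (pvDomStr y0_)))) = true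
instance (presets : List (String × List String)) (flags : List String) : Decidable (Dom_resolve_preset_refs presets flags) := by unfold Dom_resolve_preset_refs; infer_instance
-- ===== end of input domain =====

-- B replaces A's double recursion (into referenced presets and on the tail, with repeated front+rest
-- list concatenation) by one iterative depth-first loop over an explicit work stack with an
-- append-only accumulator — same flattening, measured faster on large inputs in a timing run.

-- shared primitive port: str.removeprefix('$') — PySem has no removeprefix; exact: drops the
-- one-character prefix only when the string starts with it (done on the List Char side).
def pyRemovePrefixDollar (s : String) : String :=
  if PySem.Str.startswith s "$" then String.ofList (s.toList.drop 1) else s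

-- ===== PORT A =====
-- A's recursion does not structurally terminate (a preset may reference presets); the `fuel`
-- argument is a totalization guard only: it is decremented exactly when the recursion enters a
-- referenced preset's flag list, and `none` stands for Python raising (KeyError on a missing
-- preset, or non-termination of the recursion).
def resolveAFuel (presets : List (String × List String)) (fuel : Nat) (flags : List String) : Option (List String) :=
  match flags with
  | [] => some []
  | f :: rest =>
    let front? : Option (List String) :=
      if PySem.Str.startswith f "$" then
        match PySem.Dict.get? (PySem.Dict.mk presets) (pyRemovePrefixDollar f) with
        | none => none          -- KeyError
        | some l =>
          match fuel with
          | 0 => none            -- fuel guard, never reached under Pre_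
          | fuel' + 1 => resolveAFuel presets fuel' l
      else some [f]
    match front?, resolveAFuel presets fuel rest with
    | some a, some b => some (a ++ b)
    | _, _ => none
termination_by (fuel, flags.length)
decreasing_by
  · exact Prod.Lex.left _ _ (Nat.lt_succ_self _)
  · exact Prod.Lex.right _ (by simp)

-- depth presets.length + 1 suffices for every input the claim covers: an acyclic reference
-- chain cannot be longer than the number of presets.
def resolve_preset_refs (presets : List (String × List String)) (flags : List String) : List String :=
  (resolveAFuel presets (presets.length + 1) flags).getD []

-- ===== PORT B =====
-- Python's stack list keeps its top at the END; the port keeps the top at the HEAD, so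
-- `list(reversed(flags))` becomes `flags`, `stack.pop()` takes the head, and
-- `stack.extend(reversed(presets[name]))` becomes `l ++ stack` — pops and pushes correspond
-- one-to-one. `fuel` counts loop iterations (totalization guard; `none` = Python raises/loops).
def resolveBLoop (presets : List (String × List String)) : Nat → List String → List String → Option (List String)
  | _, [], result => some result
  | 0, _ :: _, _ => none
  | fuel + 1, item :: stack, result =>
    if PySem.Str.startswith item "$" then
      match PySem.Dict.get? (PySem.Dict.mk presets) (pyRemovePrefixDollar item) with
      | none => none            -- KeyError
      | some l => resolveBLoop presets fuel (l ++ stack) result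
    else resolveBLoop presets fuel stack (result ++ [item])

def presetSizeSum (presets : List (String × List String)) : Nat :=
  (presets.map (fun p => p.2.length)).sum

-- the fuel is an upper bound on the loop's iteration count for every input the claim covers
def resolve_preset_refs_alt (presets : List (String × List String)) (flags : List String) : List String :=
  (resolveBLoop presets (flags.length * (presetSizeSum presets + 2) ^ (presets.length + 1)) flags []).getD []

-- ===== PRECONDITION & SPEC =====
-- the preset names referenced by the strings of l
def refNamesOf (l : List String) : List String :=
  l.filterMap (fun s => if PySem.Str.startswith s "$" then some (pyRemovePrefixDollar s) else none)

-- okKey d k: preset k exists and the reference graph below it is well-founded within depth d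
def okKey (presets : List (String × List String)) : Nat → String → Bool
  | 0, _ => false
  | d + 1, k =>
    match PySem.Dict.get? (PySem.Dict.mk presets) k with
    | none => false
    | some l => (refNamesOf l).all (okKey presets d)

-- Pre_: every preset reference reachable from flags resolves to an existing preset and the
-- reachable reference graph is acyclic (equivalently, well-founded within depth
-- presets.length + 1, since a longer chain must repeat a key). These are exactly the inputs on
-- which Python A returns; outside it A raises KeyError or RecursionError.
def Pre_resolve_preset_refs (presets : List (String × List String)) (flags : List String) : Prop :=
  (refNamesOf flags).all (okKey presets (presets.length + 1)) = true

instance (presets : List (String × List String)) (flags : List String) : Decidable (Pre_resolve_preset_refs presets flags) := by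
  unfold Pre_resolve_preset_refs; infer_instance

def pvWitness_resolve_preset_refs : (List (String × List String)) × List String :=
  ([("a", ["x", "$b"]), ("b", ["y"])], ["$a", "z"])

def Spec_resolve_preset_refs (presets : List (String × List String)) (flags : List String) (out : List String) : Prop := out = resolve_preset_refs_alt presets flags
instance (presets : List (String × List String)) (flags : List String) (out : List String) : Decidable (Spec_resolve_preset_refs presets flags out) := by unfold Spec_resolve_preset_refs; infer_instance

-- ===== CLAIM (what is proved, stated in full; the proofs are below) =====
def Claim_equal_resolve_preset_refs : Prop := ∀ (presets : List (String × List String)) (flags : List String), Dom_resolve_preset_refs presets flags → Pre_resolve_preset_refs presets flags → Spec_resolve_preset_refs presets flags (resolve_preset_refs presets flags)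

-- ===== LEMMAS AND PROOFS =====

-- iteration-count mirror of resolveAFuel: counts the pops B's loop would perform (1 per flag,
-- plus the pops inside each expanded preset)
def costA (presets : List (String × List String)) (fuel : Nat) (flags : List String) : Option Nat :=
  match flags with
  | [] => some 0
  | f :: rest =>
    let front? : Option Nat :=
      if PySem.Str.startswith f "$" then
        match PySem.Dict.get? (PySem.Dict.mk presets) (pyRemovePrefixDollar f) with
        | none => none
        | some l =>
          match fuel with
          | 0 => none
          | fuel' + 1 => costA presets fuel' l
      else some 0
    match front?, costA presets fuel rest with
    | some a, some b => some (a + 1 + b)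
    | _, _ => none
termination_by (fuel, flags.length)
decreasing_by
  · exact Prod.Lex.left _ _ (Nat.lt_succ_self _)
  · exact Prod.Lex.right _ (by simp)

lemma RA_nil (p : List (String × List String)) (fuel : Nat) : resolveAFuel p fuel [] = some [] := by
  rw [resolveAFuel]

lemma RA_cons (p : List (String × List String)) (fuel : Nat) (f : String) (rest : List String) :
    resolveAFuel p fuel (f :: rest) =
      (match (if PySem.Str.startswith f "$" then
          match PySem.Dict.get? (PySem.Dict.mk p) (pyRemovePrefixDollar f) with
          | none => none
          | some l => match fuel with | 0 => none | fuel' + 1 => resolveAFuel p fuel' l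
        else some [f]), resolveAFuel p fuel rest with
       | some a, some b => some (a ++ b)
       | _, _ => none) := by
  rw [resolveAFuel]

lemma CA_nil (p : List (String × List String)) (fuel : Nat) : costA p fuel [] = some 0 := by
  rw [costA]

lemma CA_cons (p : List (String × List String)) (fuel : Nat) (f : String) (rest : List String) :
    costA p fuel (f :: rest) =
      (match (if PySem.Str.startswith f "$" then
          match PySem.Dict.get? (PySem.Dict.mk p) (pyRemovePrefixDollar f) with
          | none => none
          | some l => match fuel with | 0 => none | fuel' + 1 => costA p fuel' l
        else some 0), costA p fuel rest with
       | some a, some b => some (a + 1 + b)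
       | _, _ => none) := by
  rw [costA]

lemma match_optL (x y : Option (List String)) :
    (match x, y with | some a, some b => some (a ++ b) | _, _ => none)
      = x.bind (fun a => y.map (fun b => a ++ b)) := by
  cases x <;> cases y <;> rfl

lemma match_optN (x y : Option Nat) :
    (match x, y with | some a, some b => some (a + 1 + b) | _, _ => none)
      = x.bind (fun a => y.map (fun b => a + 1 + b)) := by
  cases x <;> cases y <;> rfl

-- equation lemmas for the two fueled ports and okKey (the `rfl`-style shapes the proofs rewrite with)

lemma RA_cons_lit (p : List (String × List String)) (fuel : Nat) (f : String) (rest : List String)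
    (hf : PySem.Str.startswith f "$" = false) :
    resolveAFuel p fuel (f :: rest) = (resolveAFuel p fuel rest).map (fun b => f :: b) := by
  rw [RA_cons, match_optL, if_neg (by rw [hf]; simp)]
  rfl

lemma RA_cons_ref_none (p : List (String × List String)) (fuel : Nat) (f : String) (rest : List String)
    (hf : PySem.Str.startswith f "$" = true)
    (hget : PySem.Dict.get? (PySem.Dict.mk p) (pyRemovePrefixDollar f) = none) :
    resolveAFuel p fuel (f :: rest) = none := by
  rw [RA_cons, match_optL, if_pos hf, hget]
  cases fuel <;> rfl

lemma RA_cons_ref_zero (p : List (String × List String)) (f : String) (rest lk : List String)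
    (hf : PySem.Str.startswith f "$" = true)
    (hget : PySem.Dict.get? (PySem.Dict.mk p) (pyRemovePrefixDollar f) = some lk) :
    resolveAFuel p 0 (f :: rest) = none := by
  rw [RA_cons, match_optL, if_pos hf, hget]
  rfl

lemma RA_cons_ref_succ (p : List (String × List String)) (fuel : Nat) (f : String) (rest lk : List String)
    (hf : PySem.Str.startswith f "$" = true)
    (hget : PySem.Dict.get? (PySem.Dict.mk p) (pyRemovePrefixDollar f) = some lk) :
    resolveAFuel p (fuel + 1) (f :: rest)
      = (resolveAFuel p fuel lk).bind (fun a => (resolveAFuel p (fuel + 1) rest).map (fun b => a ++ b)) := by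
  rw [RA_cons, match_optL, if_pos hf, hget]

lemma CA_cons_lit (p : List (String × List String)) (fuel : Nat) (f : String) (rest : List String)
    (hf : PySem.Str.startswith f "$" = false) :
    costA p fuel (f :: rest) = (costA p fuel rest).map (fun b => 0 + 1 + b) := by
  rw [CA_cons, match_optN, if_neg (by rw [hf]; simp)]
  rfl

lemma CA_cons_ref_succ (p : List (String × List String)) (fuel : Nat) (f : String) (rest lk : List String)
    (hf : PySem.Str.startswith f "$" = true)
    (hget : PySem.Dict.get? (PySem.Dict.mk p) (pyRemovePrefixDollar f) = some lk) :
    costA p (fuel + 1) (f :: rest)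
      = (costA p fuel lk).bind (fun a => (costA p (fuel + 1) rest).map (fun b => a + 1 + b)) := by
  rw [CA_cons, match_optN, if_pos hf, hget]

lemma BL_nil (p : List (String × List String)) (fuel : Nat) (acc : List String) :
    resolveBLoop p fuel [] acc = some acc := by
  cases fuel <;> rfl

lemma BL_succ_lit (p : List (String × List String)) (fuel : Nat) (x : String) (st acc : List String)
    (hf : PySem.Str.startswith x "$" = false) :
    resolveBLoop p (fuel + 1) (x :: st) acc = resolveBLoop p fuel st (acc ++ [x]) := by
  simp only [resolveBLoop]
  rw [if_neg (by rw [hf]; simp)]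

lemma BL_succ_ref_some (p : List (String × List String)) (fuel : Nat) (x : String) (st acc lk : List String)
    (hf : PySem.Str.startswith x "$" = true)
    (hget : PySem.Dict.get? (PySem.Dict.mk p) (pyRemovePrefixDollar x) = some lk) :
    resolveBLoop p (fuel + 1) (x :: st) acc = resolveBLoop p fuel (lk ++ st) acc := by
  simp only [resolveBLoop]
  rw [if_pos hf, hget]

lemma refNamesOf_cons_ref (f : String) (rest : List String) (hf : PySem.Str.startswith f "$" = true) :
    refNamesOf (f :: rest) = pyRemovePrefixDollar f :: refNamesOf rest := by
  simp only [refNamesOf, List.filterMap_cons]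
  rw [if_pos hf]

lemma refNamesOf_cons_lit (f : String) (rest : List String) (hf : PySem.Str.startswith f "$" = false) :
    refNamesOf (f :: rest) = refNamesOf rest := by
  simp only [refNamesOf, List.filterMap_cons]
  rw [if_neg (by rw [hf]; simp)]

lemma okKey_succ_some (p : List (String × List String)) (d : Nat) (k : String) (l : List String)
    (hget : PySem.Dict.get? (PySem.Dict.mk p) k = some l) :
    okKey p (d + 1) k = (refNamesOf l).all (okKey p d) := by
  rw [okKey, hget]

lemma okKey_succ_none (p : List (String × List String)) (d : Nat) (k : String)
    (hget : PySem.Dict.get? (PySem.Dict.mk p) k = none) :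
    okKey p (d + 1) k = false := by
  rw [okKey, hget]

lemma lookup_len_le (p : List (String × List String)) (k : String) (l : List String)
    (h : PySem.Dict.get? (PySem.Dict.mk p) k = some l) : l.length ≤ presetSizeSum p := by
  induction p with
  | nil => simp [PySem.Dict.get?] at h
  | cons hd tl ih =>
    rw [PySem.Dict.get?_mk_cons] at h
    by_cases hk : hd.1 == k
    · simp [hk] at h
      simp [presetSizeSum, ← h]
    · simp [hk] at h
      calc l.length ≤ presetSizeSum tl := ih h
        _ ≤ presetSizeSum (hd :: tl) := by simp [presetSizeSum]

lemma RA_mono (p : List (String × List String)) (fuel : Nat) (l out : List String)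
    (h : resolveAFuel p fuel l = some out) : resolveAFuel p (fuel + 1) l = some out := by
  induction fuel generalizing l out with
  | zero =>
    induction l generalizing out with
    | nil => rw [RA_nil] at h ⊢; exact h
    | cons f rest ihl =>
      cases hf : PySem.Str.startswith f "$" with
      | true =>
        cases hget : PySem.Dict.get? (PySem.Dict.mk p) (pyRemovePrefixDollar f) with
        | none => rw [RA_cons_ref_none p _ _ _ hf hget] at h; exact absurd h (by simp)
        | some lk => rw [RA_cons_ref_zero p _ _ _ hf hget] at h; exact absurd h (by simp)
      | false =>
        rw [RA_cons_lit p _ _ _ hf] at h ⊢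
        obtain ⟨b, hb, rfl⟩ := Option.map_eq_some_iff.mp h
        rw [ihl b hb]
        rfl
  | succ n ihn =>
    induction l generalizing out with
    | nil => rw [RA_nil] at h ⊢; exact h
    | cons f rest ihl =>
      cases hf : PySem.Str.startswith f "$" with
      | true =>
        cases hget : PySem.Dict.get? (PySem.Dict.mk p) (pyRemovePrefixDollar f) with
        | none => rw [RA_cons_ref_none p _ _ _ hf hget] at h; exact absurd h (by simp)
        | some lk =>
          rw [RA_cons_ref_succ p _ _ _ _ hf hget] at h
          rw [RA_cons_ref_succ p _ _ _ _ hf hget]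
          simp only [Option.bind_eq_some_iff, Option.map_eq_some_iff] at h
          obtain ⟨a, ha, b, hb, rfl⟩ := h
          rw [ihn _ _ ha, ihl _ hb]
          rfl
      | false =>
        rw [RA_cons_lit p _ _ _ hf] at h ⊢
        obtain ⟨b, hb, rfl⟩ := Option.map_eq_some_iff.mp h
        rw [ihl b hb]
        rfl

lemma CA_mono (p : List (String × List String)) (fuel : Nat) (l : List String) (c : Nat)
    (h : costA p fuel l = some c) : costA p (fuel + 1) l = some c := by
  induction fuel generalizing l c with
  | zero =>
    induction l generalizing c with
    | nil => rw [CA_nil] at h ⊢; exact h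
    | cons f rest ihl =>
      cases hf : PySem.Str.startswith f "$" with
      | true =>
        cases hget : PySem.Dict.get? (PySem.Dict.mk p) (pyRemovePrefixDollar f) with
        | none =>
          rw [CA_cons, match_optN, if_pos hf, hget] at h
          exact absurd h (by cases (0 : Nat) <;> simp)
        | some lk =>
          rw [CA_cons, match_optN, if_pos hf, hget] at h
          exact absurd h (by simp)
      | false =>
        rw [CA_cons_lit p _ _ _ hf] at h ⊢
        obtain ⟨b, hb, rfl⟩ := Option.map_eq_some_iff.mp h
        rw [ihl b hb]
        rfl
  | succ n ihn =>
    induction l generalizing c with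
    | nil => rw [CA_nil] at h ⊢; exact h
    | cons f rest ihl =>
      cases hf : PySem.Str.startswith f "$" with
      | true =>
        cases hget : PySem.Dict.get? (PySem.Dict.mk p) (pyRemovePrefixDollar f) with
        | none =>
          rw [CA_cons, match_optN, if_pos hf, hget] at h
          exact absurd h (by simp)
        | some lk =>
          rw [CA_cons_ref_succ p _ _ _ _ hf hget] at h
          rw [CA_cons_ref_succ p _ _ _ _ hf hget]
          simp only [Option.bind_eq_some_iff, Option.map_eq_some_iff] at h
          obtain ⟨a, ha, b, hb, rfl⟩ := h
          rw [ihn _ _ ha, ihl _ hb]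
          rfl
      | false =>
        rw [CA_cons_lit p _ _ _ hf] at h ⊢
        obtain ⟨b, hb, rfl⟩ := Option.map_eq_some_iff.mp h
        rw [ihl b hb]
        rfl

lemma RA_append (p : List (String × List String)) (fuel : Nat) (xs ys a b : List String)
    (hx : resolveAFuel p fuel xs = some a) (hy : resolveAFuel p fuel ys = some b) :
    resolveAFuel p fuel (xs ++ ys) = some (a ++ b) := by
  induction xs generalizing a with
  | nil =>
    rw [RA_nil] at hx
    cases hx
    simpa using hy
  | cons f rest ihl =>
    cases hf : PySem.Str.startswith f "$" with
    | true =>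
      cases hget : PySem.Dict.get? (PySem.Dict.mk p) (pyRemovePrefixDollar f) with
      | none => rw [RA_cons_ref_none p _ _ _ hf hget] at hx; exact absurd hx (by simp)
      | some lk =>
        cases fuel with
        | zero => rw [RA_cons_ref_zero p _ _ _ hf hget] at hx; exact absurd hx (by simp)
        | succ n =>
          rw [RA_cons_ref_succ p _ _ _ _ hf hget] at hx
          simp only [Option.bind_eq_some_iff, Option.map_eq_some_iff] at hx
          obtain ⟨a1, ha1, b1, hb1, rfl⟩ := hx
          rw [List.cons_append, RA_cons_ref_succ p _ _ _ _ hf hget, ha1, ihl _ hb1]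
          simp
    | false =>
      rw [RA_cons_lit p _ _ _ hf] at hx
      obtain ⟨b1, hb1, rfl⟩ := Option.map_eq_some_iff.mp hx
      rw [List.cons_append, RA_cons_lit p _ _ _ hf, ihl _ hb1]
      rfl

lemma CA_append (p : List (String × List String)) (fuel : Nat) (xs ys : List String) (a b : Nat)
    (hx : costA p fuel xs = some a) (hy : costA p fuel ys = some b) :
    costA p fuel (xs ++ ys) = some (a + b) := by
  induction xs generalizing a with
  | nil =>
    rw [CA_nil] at hx
    cases hx
    simpa using hy
  | cons f rest ihl =>
    cases hf : PySem.Str.startswith f "$" with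
    | true =>
      cases hget : PySem.Dict.get? (PySem.Dict.mk p) (pyRemovePrefixDollar f) with
      | none => rw [CA_cons, match_optN, if_pos hf, hget] at hx; exact absurd hx (by cases fuel <;> simp)
      | some lk =>
        cases fuel with
        | zero => rw [CA_cons, match_optN, if_pos hf, hget] at hx; exact absurd hx (by simp)
        | succ n =>
          rw [CA_cons_ref_succ p _ _ _ _ hf hget] at hx
          simp only [Option.bind_eq_some_iff, Option.map_eq_some_iff] at hx
          obtain ⟨a1, ha1, b1, hb1, rfl⟩ := hx
          rw [List.cons_append, CA_cons_ref_succ p _ _ _ _ hf hget, ha1, ihl _ hb1]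
          simp only [Option.bind_some, Option.map_some, Option.some.injEq]
          omega
    | false =>
      rw [CA_cons_lit p _ _ _ hf] at hx
      obtain ⟨b1, hb1, rfl⟩ := Option.map_eq_some_iff.mp hx
      rw [List.cons_append, CA_cons_lit p _ _ _ hf, ihl _ hb1]
      simp only [Option.map_some, Option.some.injEq]
      omega

lemma ok_sound (p : List (String × List String)) (d : Nat) (l : List String)
    (h : (refNamesOf l).all (okKey p d) = true) :
    ∃ out c, resolveAFuel p d l = some out ∧ costA p d l = some c := by
  induction d generalizing l with
  | zero =>
    induction l with
    | nil => exact ⟨[], 0, RA_nil p 0, CA_nil p 0⟩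
    | cons f rest ihl =>
      cases hf : PySem.Str.startswith f "$" with
      | true =>
        rw [refNamesOf_cons_ref _ _ hf, List.all_cons] at h
        simp only [Bool.and_eq_true] at h
        rw [okKey] at h
        exact absurd h.1 (by simp)
      | false =>
        rw [refNamesOf_cons_lit _ _ hf] at h
        obtain ⟨out, c, hR, hC⟩ := ihl h
        exact ⟨f :: out, 0 + 1 + c, by rw [RA_cons_lit p _ _ _ hf, hR]; rfl,
               by rw [CA_cons_lit p _ _ _ hf, hC]; rfl⟩
  | succ n ihn =>
    induction l with
    | nil => exact ⟨[], 0, RA_nil p _, CA_nil p _⟩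
    | cons f rest ihl =>
      cases hf : PySem.Str.startswith f "$" with
      | true =>
        rw [refNamesOf_cons_ref _ _ hf, List.all_cons, Bool.and_eq_true] at h
        obtain ⟨hk, hrest⟩ := h
        cases hget : PySem.Dict.get? (PySem.Dict.mk p) (pyRemovePrefixDollar f) with
        | none => rw [okKey_succ_none p _ _ hget] at hk; exact absurd hk (by simp)
        | some lk =>
          rw [okKey_succ_some p _ _ _ hget] at hk
          obtain ⟨a, ca, hRa, hCa⟩ := ihn lk hk
          obtain ⟨b, cb, hRb, hCb⟩ := ihl hrest
          refine ⟨a ++ b, ca + 1 + cb, ?_, ?_⟩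
          · rw [RA_cons_ref_succ p _ _ _ _ hf hget, hRa, hRb]
            rfl
          · rw [CA_cons_ref_succ p _ _ _ _ hf hget, hCa, hCb]
            rfl
      | false =>
        rw [refNamesOf_cons_lit _ _ hf] at h
        obtain ⟨out, c, hR, hC⟩ := ihl h
        exact ⟨f :: out, 0 + 1 + c, by rw [RA_cons_lit p _ _ _ hf, hR]; rfl,
               by rw [CA_cons_lit p _ _ _ hf, hC]; rfl⟩

lemma CA_bound (p : List (String × List String)) (d : Nat) (l : List String) (c : Nat)
    (h : costA p d l = some c) : c ≤ l.length * (presetSizeSum p + 2) ^ d := by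
  induction d generalizing l c with
  | zero =>
    induction l generalizing c with
    | nil => rw [CA_nil] at h; cases h; simp
    | cons f rest ihl =>
      cases hf : PySem.Str.startswith f "$" with
      | true =>
        rw [CA_cons, match_optN, if_pos hf] at h
        cases hget : PySem.Dict.get? (PySem.Dict.mk p) (pyRemovePrefixDollar f) <;>
          rw [hget] at h <;> exact absurd h (by simp)
      | false =>
        rw [CA_cons_lit p _ _ _ hf] at h
        obtain ⟨cb, hcb, rfl⟩ := Option.map_eq_some_iff.mp h
        have := ihl _ hcb
        simp only [List.length_cons, pow_zero, Nat.mul_one] at this ⊢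
        omega
  | succ n ihn =>
    induction l generalizing c with
    | nil => rw [CA_nil] at h; cases h; simp
    | cons f rest ihl =>
      cases hf : PySem.Str.startswith f "$" with
      | true =>
        cases hget : PySem.Dict.get? (PySem.Dict.mk p) (pyRemovePrefixDollar f) with
        | none => rw [CA_cons, match_optN, if_pos hf, hget] at h; exact absurd h (by simp)
        | some lk =>
          rw [CA_cons_ref_succ p _ _ _ _ hf hget] at h
          simp only [Option.bind_eq_some_iff, Option.map_eq_some_iff] at h
          obtain ⟨ca, hca, cb, hcb, rfl⟩ := h
          have h1 : ca ≤ lk.length * (presetSizeSum p + 2) ^ n := ihn _ _ hca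
          have h2 : cb ≤ rest.length * (presetSizeSum p + 2) ^ (n + 1) := ihl _ hcb
          have h3 : lk.length ≤ presetSizeSum p := lookup_len_le p _ _ hget
          have h4 : 1 ≤ (presetSizeSum p + 2) ^ n := Nat.one_le_pow _ _ (by omega)
          have h5 : (presetSizeSum p + 2) ^ (n + 1) = (presetSizeSum p + 2) ^ n * (presetSizeSum p + 2) :=
            pow_succ _ _
          simp only [List.length_cons]
          rw [h5] at h2 ⊢
          nlinarith [h1, h2, h3, h4]
      | false =>
        rw [CA_cons_lit p _ _ _ hf] at h
        obtain ⟨cb, hcb, rfl⟩ := Option.map_eq_some_iff.mp h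
        have h2 := ihl _ hcb
        have h4 : 1 ≤ (presetSizeSum p + 2) ^ (n + 1) := Nat.one_le_pow _ _ (by omega)
        simp only [List.length_cons]
        nlinarith [h2, h4]

lemma BL_mono (p : List (String × List String)) (fuel : Nat) (st acc r : List String)
    (h : resolveBLoop p fuel st acc = some r) : resolveBLoop p (fuel + 1) st acc = some r := by
  induction fuel generalizing st acc with
  | zero =>
    cases st with
    | nil => rw [BL_nil] at h ⊢; exact h
    | cons x s => exact absurd h (by simp [resolveBLoop])
  | succ n ihn =>
    cases st with
    | nil => rw [BL_nil] at h ⊢; exact h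
    | cons x s =>
      cases hf : PySem.Str.startswith x "$" with
      | true =>
        cases hget : PySem.Dict.get? (PySem.Dict.mk p) (pyRemovePrefixDollar x) with
        | none =>
          have hn : resolveBLoop p (n + 1) (x :: s) acc = none := by
            simp only [resolveBLoop]
            rw [if_pos hf, hget]
          rw [hn] at h
          exact absurd h (by simp)
        | some lk =>
          rw [BL_succ_ref_some p _ _ _ _ _ hf hget] at h
          rw [BL_succ_ref_some p _ _ _ _ _ hf hget]
          exact ihn _ _ h
      | false =>
        rw [BL_succ_lit p _ _ _ _ hf] at h
        rw [BL_succ_lit p _ _ _ _ hf]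
        exact ihn _ _ h

lemma BL_mono_le (p : List (String × List String)) {fuel fuel' : Nat} (hle : fuel ≤ fuel')
    (st acc r : List String) (h : resolveBLoop p fuel st acc = some r) :
    resolveBLoop p fuel' st acc = some r := by
  induction hle with
  | refl => exact h
  | step _ ih => exact BL_mono _ _ _ _ _ ih

lemma BL_sim (p : List (String × List String)) (c : Nat) :
    ∀ (d : Nat) (stack out acc : List String),
      resolveAFuel p d stack = some out → costA p d stack = some c →
      resolveBLoop p c stack acc = some (acc ++ out) := by
  induction c using Nat.strong_induction_on with
  | _ c ih =>
    intro d stack out acc hR hC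
    cases stack with
    | nil =>
      rw [RA_nil] at hR
      cases hR
      rw [BL_nil]
      simp
    | cons f rest =>
      cases hf : PySem.Str.startswith f "$" with
      | true =>
        cases hget : PySem.Dict.get? (PySem.Dict.mk p) (pyRemovePrefixDollar f) with
        | none => rw [RA_cons_ref_none p _ _ _ hf hget] at hR; exact absurd hR (by simp)
        | some lk =>
          cases d with
          | zero => rw [RA_cons_ref_zero p _ _ _ hf hget] at hR; exact absurd hR (by simp)
          | succ n =>
            rw [RA_cons_ref_succ p _ _ _ _ hf hget] at hR
            rw [CA_cons_ref_succ p _ _ _ _ hf hget] at hC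
            simp only [Option.bind_eq_some_iff, Option.map_eq_some_iff] at hR hC
            obtain ⟨a, ha, b, hb, rfl⟩ := hR
            obtain ⟨ca, hca, cb, hcb, rfl⟩ := hC
            have hR' : resolveAFuel p (n + 1) (lk ++ rest) = some (a ++ b) :=
              RA_append p _ _ _ _ _ (RA_mono p _ _ _ ha) hb
            have hC' : costA p (n + 1) (lk ++ rest) = some (ca + cb) :=
              CA_append p _ _ _ _ _ (CA_mono p _ _ _ hca) hcb
            have hst : ca + 1 + cb = (ca + cb) + 1 := by omega
            rw [hst, BL_succ_ref_some p _ _ _ _ _ hf hget]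
            exact ih (ca + cb) (by omega) _ _ _ _ hR' hC'
      | false =>
        rw [RA_cons_lit p _ _ _ hf] at hR
        rw [CA_cons_lit p _ _ _ hf] at hC
        obtain ⟨b, hb, rfl⟩ := Option.map_eq_some_iff.mp hR
        obtain ⟨cb, hcb, rfl⟩ := Option.map_eq_some_iff.mp hC
        have hst : 0 + 1 + cb = cb + 1 := by omega
        rw [hst, BL_succ_lit p _ _ _ _ hf]
        have := ih cb (by omega) _ _ _ (acc ++ [f]) hb hcb
        rw [this]
        simp

-- ===== VERDICT (by name: the statement is the Claim_ definition above) =====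
theorem resolve_preset_refs_spec : Claim_equal_resolve_preset_refs := by
  intro p flags _ hPre
  unfold Spec_resolve_preset_refs resolve_preset_refs resolve_preset_refs_alt
  obtain ⟨out, c, hR, hC⟩ := ok_sound p (p.length + 1) flags hPre
  have hb := CA_bound p _ _ _ hC
  have hB := BL_sim p c _ _ _ [] hR hC
  have hB' := BL_mono_le p hb _ _ _ hB
  rw [hR, hB']
  simp
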